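-- pv_equiv track=rewrite | github.com/highflykxf/pycharm_projects | lunwen/OPEREVENT/clusteranalysis/clustering_v3.py | extract_clusters
-- ===== SOURCE A (Python) =====
-- def extract_clusters(Z, threshold, n):
--     clusters = {}
--     ct = n
--     for row in Z:
--         if row[2] < threshold:
--             n1 = int(row[0])
--             n2 = int(row[1])
--
--             if n1 >= n:
--                 l1 = clusters[n1]
--                 del (clusters[n1])
--             else:
--                 l1 = [n1]
--
--             if n2 >= n:
--                 l2 = clusters[n2]
--                 del (clusters[n2])
--             else:
--                 l2 = [n2]
--             l1.extend(l2)
--             clusters[ct] = l1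
--             ct += 1
--         else:
--             return clusters
-- ===== SOURCE B (Python) =====
-- def _leaves(merges, n, cid):
--     if cid >= n:
--         a, b = merges[cid - n]
--         return _leaves(merges, n, a) + _leaves(merges, n, b)
--     return [cid]
--
--
-- def extract_clusters(Z, threshold, n):
--     # find the first row that stops the merging (A returns there);
--     # if no row stops it, A falls off the loop and returns None
--     k = None
--     for i, row in enumerate(Z):
--         if not (row[2] < threshold):
--             k = i
--             break
--     if k is None:
--         return None
--     merges = [(int(Z[i][0]), int(Z[i][1])) for i in range(k)]
--     consumed = set(c for ab in merges for c in ab if c >= n)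
--     result = {}
--     for i in range(k):
--         cid = n + i
--         if cid not in consumed:
--             result[cid] = _leaves(merges, n, cid)
--     return result
-- ===== Notes on version B (the rewrite author's own statement) =====
-- stated objective: alternative
-- what changed: A merges clusters eagerly, keeping whole leaf lists in a dict, copying and re-keying them on every merge (lookup/delete/extend), while B records the (left,right) children of each merge in one pass, computes the set of consumed ids, and flattens each surviving cluster's merge tree once at the end.
import Mathlib
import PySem

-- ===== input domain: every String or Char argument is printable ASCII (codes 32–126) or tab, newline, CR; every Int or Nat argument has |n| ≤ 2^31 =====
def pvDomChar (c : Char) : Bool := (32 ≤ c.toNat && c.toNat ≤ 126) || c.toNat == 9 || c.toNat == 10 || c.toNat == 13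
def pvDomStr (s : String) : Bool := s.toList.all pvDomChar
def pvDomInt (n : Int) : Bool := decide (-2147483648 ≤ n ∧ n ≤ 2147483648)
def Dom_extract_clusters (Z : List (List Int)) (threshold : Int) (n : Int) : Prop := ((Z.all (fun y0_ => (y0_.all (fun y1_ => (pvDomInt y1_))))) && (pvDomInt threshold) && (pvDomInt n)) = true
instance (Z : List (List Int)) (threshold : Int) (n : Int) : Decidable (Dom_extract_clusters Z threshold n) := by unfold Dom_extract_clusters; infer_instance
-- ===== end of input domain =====

-- B replaces A's repeated dict lookup/delete/extend merging by one scan that records the merges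
-- and a single flatten of each surviving cluster at the end (alternative algorithm, same result).

-- ===== PORT A =====
-- the two 'if nX >= n' blocks of A (lookup + delete vs singleton); none = KeyError (excluded by Pre_)
def pvEcStep (n : Int) (clusters : PySem.Dict Int (List Int)) (c : Int) :
    Option (List Int × PySem.Dict Int (List Int)) :=
  if n ≤ c then (clusters.get? c).map (fun l => (l, clusters.erase c))
  else some ([c], clusters)

-- A's for-loop; none = Python's implicit None when the loop falls through, and also the raising
-- inputs (IndexError/KeyError), which Pre_ excludes
def pvEcLoop (threshold : Int) (n : Int) :
    List (List Int) → PySem.Dict Int (List Int) → Int → Option (List (Int × List Int))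
  | [], _clusters, _ct => none
  | row :: rest, clusters, ct =>
    match PySem.List.pyGet? row 2 with
    | none => none
    | some v =>
      if v < threshold then
        match PySem.List.pyGet? row 0, PySem.List.pyGet? row 1 with
        | some n1, some n2 =>
          match pvEcStep n clusters n1 with
          | none => none
          | some (l1, c1) =>
            match pvEcStep n c1 n2 with
            | none => none
            | some (l2, c2) => pvEcLoop threshold n rest (c2.insert ct (l1 ++ l2)) (ct + 1)
        | _, _ => none
      else some clusters.items

def extract_clusters (Z : List (List Int)) (threshold : Int) (n : Int) :
    Option (List (Int × List Int)) :=
  pvEcLoop threshold n Z PySem.Dict.empty n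

-- ===== PORT B =====
-- Source B's first loop: index of the first row whose row[2] stops the merging;
-- none = IndexError while scanning (excluded by Pre_), some none = no stopping row (A returns None)
def pvFindStop (threshold : Int) : List (List Int) → Option (Option Nat)
  | [] => some none
  | row :: rest =>
    match PySem.List.pyGet? row 2 with
    | none => none
    | some v =>
      if v < threshold then (pvFindStop threshold rest).map (Option.map (· + 1))
      else some (some 0)

-- Source B's _leaves; the fuel only makes the recursion structural (Source B recurses on a strictly
-- smaller merge index under Pre_); an out-of-range merges[cid-n] raises in Source B (outside Pre_)
def pvLeaves (merges : List (Int × Int)) (n : Int) : Nat → Int → List Int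
  | 0, cid => [cid]
  | fuel + 1, cid =>
    if n ≤ cid then
      match merges[(cid - n).toNat]? with
      | some (a, b) => pvLeaves merges n fuel a ++ pvLeaves merges n fuel b
      | none => [cid]
    else [cid]

-- rows before the stop all have length ≥ 3 (their row[2] was read), so getD is exact for Z[i][0/1]
def extract_clusters_alt (Z : List (List Int)) (threshold : Int) (n : Int) :
    Option (List (Int × List Int)) :=
  match pvFindStop threshold Z with
  | none => none
  | some none => none
  | some (some k) =>
    let merges := (Z.take k).map (fun r => (r.getD 0 0, r.getD 1 0))
    let consumed : PySem.Set Int :=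
      PySem.Set.ofList ((merges.flatMap (fun p => [p.1, p.2])).filter (fun c => n ≤ c))
    some ((List.range k).foldl (fun acc (i : Nat) =>
      if consumed.contains (n + (i : Int)) then acc
      else acc ++ [(n + (i : Int), pvLeaves merges n k (n + (i : Int)))]) [])

-- ===== PRECONDITION & SPEC =====
-- number of leading rows with ≥ 3 entries and row[2] < threshold (the rows A merges)
def pvScanLen (threshold : Int) : List (List Int) → Nat
  | [] => 0
  | row :: rest =>
    match PySem.List.pyGet? row 2 with
    | some v => if v < threshold then pvScanLen threshold rest + 1 else 0
    | none => 0

def pvMergesOf (Z : List (List Int)) (k : Nat) : List (Int × Int) :=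
  (Z.take k).map (fun r => (r.getD 0 0, r.getD 1 0))

-- the child cluster ids (≥ n) consumed by the merge rows, in order
def pvKids (M : List (Int × Int)) (n : Int) : List Int :=
  (M.flatMap (fun p => [p.1, p.2])).filter (fun c => n ≤ c)

-- Pre_ = exactly the inputs on which A returns (no IndexError/KeyError): every row A reads has at
-- least 3 entries, and every child id ≥ n names an earlier-created cluster and is consumed only once.
def Pre_extract_clusters (Z : List (List Int)) (threshold : Int) (n : Int) : Prop :=
  (∀ r ∈ Z.take (pvScanLen threshold Z + 1), 3 ≤ r.length) ∧
  (pvKids (pvMergesOf Z (pvScanLen threshold Z)) n).Nodup ∧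
  (∀ p ∈ (pvMergesOf Z (pvScanLen threshold Z)).zipIdx,
    (n ≤ p.1.1 → p.1.1 < n + (p.2 : Int)) ∧ (n ≤ p.1.2 → p.1.2 < n + (p.2 : Int)))

instance (Z : List (List Int)) (threshold : Int) (n : Int) :
    Decidable (Pre_extract_clusters Z threshold n) := by
  unfold Pre_extract_clusters; infer_instance

def pvWitness_extract_clusters : List (List Int) × Int × Int := ([[0, 1, -1], [2, 3, 5]], 0, 2)

def Spec_extract_clusters (Z : List (List Int)) (threshold : Int) (n : Int)
    (out : Option (List (Int × List Int))) : Prop := out = extract_clusters_alt Z threshold n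

instance (Z : List (List Int)) (threshold : Int) (n : Int) (out : Option (List (Int × List Int))) :
    Decidable (Spec_extract_clusters Z threshold n out) := by
  unfold Spec_extract_clusters; infer_instance

-- ===== CLAIM (what is proved, stated in full; the proofs are below) =====
def Claim_equal_extract_clusters : Prop := ∀ (Z : List (List Int)) (threshold : Int) (n : Int), Dom_extract_clusters Z threshold n → Pre_extract_clusters Z threshold n → Spec_extract_clusters Z threshold n (extract_clusters Z threshold n)

-- ===== LEMMAS AND PROOFS =====

lemma pvPyGetIdx (r : List Int) (m : Nat) (h : m < r.length) :
    PySem.List.pyGet? r (m : Int) = some (r.getD m 0) := by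
  rw [PySem.List.pyGet?_natCast, List.getElem?_eq_getElem h, List.getD_eq_getElem _ _ h]

lemma pvScanLen_le (t : Int) (Z : List (List Int)) : pvScanLen t Z ≤ Z.length := by
  induction Z with
  | nil => simp [pvScanLen]
  | cons row rest IH =>
    rw [pvScanLen]
    cases h : PySem.List.pyGet? row 2 with
    | none => simp
    | some v =>
      by_cases hv : v < t <;> simp [hv] <;> omega

lemma pvScanLen_mem_lt (t : Int) (Z : List (List Int)) :
    ∀ (j : Nat), j < pvScanLen t Z →
      ∃ v, PySem.List.pyGet? (Z.getD j []) 2 = some v ∧ v < t := by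
  induction Z with
  | nil => intro j hj; simp [pvScanLen] at hj
  | cons row rest IH =>
    intro j hj
    cases h : PySem.List.pyGet? row 2 with
    | none =>
      have h0 : pvScanLen t (row :: rest) = 0 := by rw [pvScanLen, h]
      omega
    | some v =>
      by_cases hv : v < t
      · have h1 : pvScanLen t (row :: rest) = pvScanLen t rest + 1 := by
          have hif : pvScanLen t (row :: rest)
              = if v < t then pvScanLen t rest + 1 else 0 := by rw [pvScanLen, h]
          rw [hif, if_pos hv]
        cases j with
        | zero => exact ⟨v, by simpa using h, hv⟩
        | succ j => exact IH j (by omega)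
      · have h0 : pvScanLen t (row :: rest) = 0 := by simp [pvScanLen, h, hv]
        omega

lemma pvScanLen_stop (t : Int) (Z : List (List Int)) :
    pvScanLen t Z < Z.length →
      ∀ v, PySem.List.pyGet? (Z.getD (pvScanLen t Z) []) 2 = some v → ¬ v < t := by
  induction Z with
  | nil => intro h; simp [pvScanLen] at h
  | cons row rest IH =>
    intro h v hv
    cases hg : PySem.List.pyGet? row 2 with
    | none =>
      have h0 : pvScanLen t (row :: rest) = 0 := by rw [pvScanLen, hg]
      rw [h0] at hv
      simp only [List.getD_cons_zero] at hv
      rw [hg] at hv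
      cases hv
    | some w =>
      by_cases hw : w < t
      · have hsc : pvScanLen t (row :: rest) = pvScanLen t rest + 1 := by
          simp [pvScanLen, hg, hw]
        rw [hsc] at h hv
        simp only [List.getD_cons_succ] at hv
        exact IH (by simpa using h) v hv
      · have hsc : pvScanLen t (row :: rest) = 0 := by simp [pvScanLen, hg, hw]
        rw [hsc] at hv
        simp only [List.getD_cons_zero] at hv
        rw [hg] at hv
        intro hvt
        injection hv with h'
        omega

-- the bounds part of Pre_ in indexed form
def pvHB (M : List (Int × Int)) (n : Int) : Prop :=
  ∀ j : Nat, j < M.length →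
    (n ≤ (M.getD j (0, 0)).1 → (M.getD j (0, 0)).1 < n + (j : Int)) ∧
    (n ≤ (M.getD j (0, 0)).2 → (M.getD j (0, 0)).2 < n + (j : Int))

-- canonical leaf list of a node (leaves with just enough fuel)
def pvCanon (M : List (Int × Int)) (n : Int) (c : Int) : List Int :=
  pvLeaves M n ((c - n).toNat + 1) c

lemma pvLeaves_lt {M : List (Int × Int)} {n c : Int} (h : c < n) :
    ∀ f, pvLeaves M n f c = [c]
  | 0 => rfl
  | f + 1 => by simp [pvLeaves, not_le.mpr h]

lemma pvCanon_lt {M : List (Int × Int)} {n c : Int} (h : c < n) : pvCanon M n c = [c] :=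
  pvLeaves_lt h _

lemma pvLeaves_unfold {M : List (Int × Int)} {n : Int} {j : Nat} (hj : j < M.length)
    {a b : Int} (hab : M.getD j (0, 0) = (a, b)) (g : Nat) :
    pvLeaves M n (g + 1) (n + (j : Int)) = pvLeaves M n g a ++ pvLeaves M n g b := by
  have h1 : n ≤ n + (j : Int) := by omega
  have hget : M[j]? = some (a, b) := by
    rw [List.getElem?_eq_getElem hj, ← List.getD_eq_getElem M (0, 0) hj, hab]
  simp [pvLeaves, h1, hget]

lemma pvLeaves_canon {M : List (Int × Int)} {n : Int} (hb : pvHB M n) :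
    ∀ (j : Nat), j < M.length → ∀ f, j + 1 ≤ f →
      pvLeaves M n f (n + (j : Int)) = pvCanon M n (n + (j : Int)) := by
  intro j
  induction j using Nat.strong_induction_on with
  | _ j IH =>
    intro hj f hf
    obtain ⟨f, rfl⟩ : ∃ f', f = f' + 1 := ⟨f - 1, by omega⟩
    rcases hab : M.getD j (0, 0) with ⟨a, b⟩
    have hkey : ((n + (j : Int)) - n).toNat = j := by omega
    rw [pvLeaves_unfold hj hab, pvCanon, hkey, pvLeaves_unfold hj hab]
    have hchild : ∀ c : Int, (n ≤ c → c < n + (j : Int)) →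
        ∀ g, j ≤ g → pvLeaves M n g c = pvLeaves M n j c := by
      intro c hc g hg
      by_cases hcn : c < n
      · rw [pvLeaves_lt hcn, pvLeaves_lt hcn]
      · rw [not_lt] at hcn
        have hcb := hc hcn
        have hcc : c = n + (((c - n).toNat : Nat) : Int) := by omega
        have hjclt : (c - n).toNat < j := by omega
        have hjcM : (c - n).toNat < M.length := lt_trans hjclt hj
        rw [hcc, IH _ hjclt hjcM g (by omega), IH _ hjclt hjcM j (by omega)]
    have hbj := hb j hj
    rw [hab] at hbj
    rw [hchild a hbj.1 f (by omega), hchild b hbj.2 f (by omega)]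

lemma pvCanon_merge {M : List (Int × Int)} {n : Int} (hb : pvHB M n) {j : Nat}
    (hj : j < M.length) {a b : Int} (hab : M.getD j (0, 0) = (a, b)) :
    pvCanon M n (n + (j : Int)) = pvCanon M n a ++ pvCanon M n b := by
  have hkey : ((n + (j : Int)) - n).toNat = j := by omega
  rw [pvCanon, hkey, pvLeaves_unfold hj hab]
  have hchild : ∀ c : Int, (n ≤ c → c < n + (j : Int)) → pvLeaves M n j c = pvCanon M n c := by
    intro c hc
    by_cases hcn : c < n
    · rw [pvLeaves_lt hcn, pvCanon_lt hcn]
    · rw [not_lt] at hcn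
      have hcb := hc hcn
      have hcc : c = n + (((c - n).toNat : Nat) : Int) := by omega
      rw [hcc]
      exact pvLeaves_canon hb _ (by omega) j (by omega)
  have hbj := hb j hj
  rw [hab] at hbj
  rw [hchild a hbj.1, hchild b hbj.2]

-- the model of A's dict after i merge rows, parametrised by the exclusion predicate
def pvGen (M : List (Int × Int)) (n : Int) (i : Nat) (ex : Int → Bool) : List (Int × List Int) :=
  (List.range i).filterMap (fun (j : Nat) =>
    if ex (n + (j : Int)) then none
    else some (n + (j : Int), pvCanon M n (n + (j : Int))))

def pvExK (M : List (Int × Int)) (n : Int) (i : Nat) : Int → Bool :=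
  fun c => decide (c ∈ pvKids (M.take i) n)

lemma pvGen_congr {M : List (Int × Int)} {n : Int} {i : Nat} {ex1 ex2 : Int → Bool}
    (h : ∀ j : Nat, j < i → ex1 (n + (j : Int)) = ex2 (n + (j : Int))) :
    pvGen M n i ex1 = pvGen M n i ex2 := by
  unfold pvGen
  exact List.filterMap_congr (fun j hj => by rw [h j (List.mem_range.mp hj)])

lemma pvGen_succ {M : List (Int × Int)} {n : Int} {i : Nat} {ex : Int → Bool} :
    pvGen M n (i + 1) ex = pvGen M n i ex ++
      (if ex (n + (i : Int)) then [] else [(n + (i : Int), pvCanon M n (n + (i : Int)))]) := by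
  unfold pvGen
  rw [List.range_succ, List.filterMap_append]
  congr 1
  by_cases h : ex (n + (i : Int)) <;> simp [h]

lemma mem_keys_pvGen {M : List (Int × Int)} {n : Int} {i : Nat} {ex : Int → Bool} {c : Int}
    (h : c ∈ (pvGen M n i ex).map (fun x => x.1)) : ∃ j : Nat, j < i ∧ c = n + (j : Int) := by
  obtain ⟨p, hp, rfl⟩ := List.mem_map.mp h
  obtain ⟨j, hj, hpj⟩ := List.mem_filterMap.mp hp
  by_cases hex : ex (n + (j : Int))
  · rw [if_pos hex] at hpj; cases hpj
  · rw [if_neg hex] at hpj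
    cases hpj
    exact ⟨j, List.mem_range.mp hj, rfl⟩

lemma get?_mk_append (l1 l2 : List (Int × List Int)) (c : Int) :
    (PySem.Dict.mk (l1 ++ l2)).get? c =
      ((PySem.Dict.mk l1).get? c).or ((PySem.Dict.mk l2).get? c) := by
  induction l1 with
  | nil => simp [PySem.Dict.get?]
  | cons p l1 IH =>
    rcases p with ⟨k, v⟩
    rw [List.cons_append, PySem.Dict.get?_mk_cons, PySem.Dict.get?_mk_cons]
    by_cases h : (k == c) = true
    · simp [h]
    · simp only [h]; rw [IH]; simp [h]

lemma get?_pvGen_ge {M : List (Int × Int)} {n : Int} {i : Nat} {ex : Int → Bool} {j : Nat}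
    (hj : i ≤ j) : (PySem.Dict.mk (pvGen M n i ex)).get? (n + (j : Int)) = none := by
  rw [PySem.Dict.get?_eq_none_iff_not_mem_keys]
  intro hmem
  rw [PySem.Dict.keys_mk] at hmem
  obtain ⟨j', hj', he⟩ := mem_keys_pvGen hmem
  omega

lemma get?_pvGen {M : List (Int × Int)} {n : Int} {ex : Int → Bool} {j : Nat}
    (i : Nat) (hj : j < i) (hex : ex (n + (j : Int)) = false) :
    (PySem.Dict.mk (pvGen M n i ex)).get? (n + (j : Int)) =
      some (pvCanon M n (n + (j : Int))) := by
  induction i with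
  | zero => omega
  | succ i IH =>
    rw [pvGen_succ, get?_mk_append]
    by_cases hji : j < i
    · rw [IH hji]; rfl
    · have hji' : j = i := by omega
      subst hji'
      rw [get?_pvGen_ge (le_refl j), hex]
      simp [PySem.Dict.get?_mk_cons]

lemma erase_mk (l : List (Int × List Int)) (a : Int) :
    (PySem.Dict.mk l).erase a = PySem.Dict.mk (l.filter (fun p => !(p.1 == a))) := rfl

lemma pvGen_erase {M : List (Int × Int)} {n : Int} {i : Nat} {ex : Int → Bool} {a : Int} :
    (PySem.Dict.mk (pvGen M n i ex)).erase a =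
      PySem.Dict.mk (pvGen M n i (fun c => ex c || c == a)) := by
  rw [erase_mk]
  refine congrArg PySem.Dict.mk ?_
  unfold pvGen
  generalize List.range i = l
  induction l with
  | nil => rfl
  | cons j l IH =>
    by_cases h2 : (n + (j : Int)) = a
    · by_cases h1 : ex a <;>
        simp [List.filterMap_cons, List.filter_cons, h2, h1, IH]
    · by_cases h1 : ex (n + (j : Int)) <;>
        simp [List.filterMap_cons, List.filter_cons, h1, h2, IH]

lemma pvGen_insert_fresh {M : List (Int × Int)} {n : Int} {i : Nat} {ex : Int → Bool}
    (v : List Int) :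
    (PySem.Dict.mk (pvGen M n i ex)).insert (n + (i : Int)) v =
      PySem.Dict.mk (pvGen M n i ex ++ [(n + (i : Int), v)]) := by
  have hc : (PySem.Dict.mk (pvGen M n i ex)).contains (n + (i : Int)) = false := by
    rw [← Bool.not_eq_true]
    intro hcon
    have hmem := (PySem.Dict.contains_iff_mem_keys _ _).mp hcon
    rw [PySem.Dict.keys_mk] at hmem
    obtain ⟨j, hj, he⟩ := mem_keys_pvGen hmem
    omega
  apply PySem.Dict.ext
  rw [PySem.Dict.items_insert_of_not_contains _ v hc]

lemma pvKids_append {M1 M2 : List (Int × Int)} {n : Int} :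
    pvKids (M1 ++ M2) n = pvKids M1 n ++ pvKids M2 n := by
  simp [pvKids, List.flatMap_append, List.filter_append]

lemma take_succ_merge {M : List (Int × Int)} {i : Nat} (h : i < M.length) :
    M.take (i + 1) = M.take i ++ [M.getD i (0, 0)] := by
  rw [List.take_succ, List.getElem?_eq_getElem h, List.getD_eq_getElem _ _ h]
  rfl

lemma kids_lt {M : List (Int × Int)} {n : Int} (hb : pvHB M n) :
    ∀ (i : Nat), i ≤ M.length → ∀ c ∈ pvKids (M.take i) n,
      ∃ j : Nat, j < i ∧ c < n + (j : Int) := by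
  intro i
  induction i with
  | zero => intro _ c hc; simp [pvKids] at hc
  | succ i IH =>
    intro hi c hc
    rw [take_succ_merge (by omega), pvKids_append] at hc
    rcases List.mem_append.mp hc with hc | hc
    · obtain ⟨j, hj, hcj⟩ := IH (by omega) c hc
      exact ⟨j, by omega, hcj⟩
    · rcases hab : M.getD i (0, 0) with ⟨a, b⟩
      rw [hab] at hc
      have hc' : (c = a ∨ c = b) ∧ n ≤ c := by
        simpa [pvKids, List.mem_filter] using hc
      have hbi := hb i (by omega)
      rw [hab] at hbi
      refine ⟨i, by omega, ?_⟩
      rcases hc'.1 with rfl | rfl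
      · exact hbi.1 hc'.2
      · exact hbi.2 hc'.2

lemma mem_kids_iff {M : List (Int × Int)} {n : Int} {i : Nat} (h : i < M.length)
    {a b : Int} (hab : M.getD i (0, 0) = (a, b)) (c : Int) :
    c ∈ pvKids (M.take (i + 1)) n ↔
      c ∈ pvKids (M.take i) n ∨ (n ≤ a ∧ c = a) ∨ (n ≤ b ∧ c = b) := by
  rw [take_succ_merge h, pvKids_append, hab, List.mem_append]
  constructor
  · rintro (hc | hc)
    · exact Or.inl hc
    · have hc' : (c = a ∨ c = b) ∧ n ≤ c := by simpa [pvKids, List.mem_filter] using hc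
      rcases hc'.1 with rfl | rfl
      · exact Or.inr (Or.inl ⟨hc'.2, rfl⟩)
      · exact Or.inr (Or.inr ⟨hc'.2, rfl⟩)
  · rintro (hc | ⟨hna, rfl⟩ | ⟨hnb, rfl⟩)
    · exact Or.inl hc
    · exact Or.inr (by simp [pvKids, List.mem_filter, hna])
    · exact Or.inr (by simp [pvKids, List.mem_filter, hnb])

-- the split of the Nodup hypothesis around row i
lemma kids_split {M : List (Int × Int)} {n : Int} {i : Nat} (h : i < M.length)
    {a b : Int} (hab : M.getD i (0, 0) = (a, b)) :
    pvKids M n = pvKids (M.take i) n ++ ([a, b].filter (fun c => n ≤ c))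
      ++ pvKids (M.drop (i + 1)) n := by
  conv_lhs => rw [← List.take_append_drop (i + 1) M]
  rw [pvKids_append, take_succ_merge h, pvKids_append, hab]
  rfl

-- one Python 'if nX >= n' block on the model dict
lemma pvStep_model {M : List (Int × Int)} {n : Int} {i : Nat} {ex : Int → Bool} {c : Int}
    (h : n ≤ c → (∃ jc : Nat, c = n + (jc : Int) ∧ jc < i) ∧ ex c = false) :
    pvEcStep n (PySem.Dict.mk (pvGen M n i ex)) c =
      some (pvCanon M n c, PySem.Dict.mk (pvGen M n i (fun x => ex x || x == c))) := by
  by_cases hc : n ≤ c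
  · obtain ⟨⟨jc, rfl, hjc⟩, hex⟩ := h hc
    rw [pvEcStep, if_pos hc, get?_pvGen i hjc hex]
    simp only [Option.map_some]
    rw [pvGen_erase]
  · rw [pvEcStep, if_neg hc, pvCanon_lt (not_le.mp hc)]
    have hgg : pvGen M n i ex = pvGen M n i (fun x => ex x || x == c) :=
      pvGen_congr (fun j _ => by
        have hne : ((n + (j : Int)) == c) = false := by
          rw [beq_eq_false_iff_ne]
          omega
        simp [hne])
    rw [hgg]

-- ===== the main loop invariant =====
lemma loop_model (t n : Int) (Z : List (List Int))
    (hLen : ∀ r ∈ Z.take (pvScanLen t Z + 1), 3 ≤ r.length)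
    (hnd : (pvKids (pvMergesOf Z (pvScanLen t Z)) n).Nodup)
    (hb : pvHB (pvMergesOf Z (pvScanLen t Z)) n) :
    ∀ (d i : Nat), i + d = pvScanLen t Z →
      pvEcLoop t n (Z.drop i)
        (PySem.Dict.mk (pvGen (pvMergesOf Z (pvScanLen t Z)) n i
          (pvExK (pvMergesOf Z (pvScanLen t Z)) n i))) (n + (i : Int))
      = (if pvScanLen t Z < Z.length
         then some (pvGen (pvMergesOf Z (pvScanLen t Z)) n (pvScanLen t Z)
           (pvExK (pvMergesOf Z (pvScanLen t Z)) n (pvScanLen t Z)))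
         else none) := by
  intro d
  induction d with
  | zero =>
    intro i hi
    have hieq : i = pvScanLen t Z := by omega
    subst hieq
    by_cases hkl : pvScanLen t Z < Z.length
    · rw [if_pos hkl]
      rw [List.drop_eq_getElem_cons hkl]
      have h3 : 3 ≤ (Z[pvScanLen t Z]'hkl).length := by
        apply hLen
        have h1 : pvScanLen t Z < (Z.take (pvScanLen t Z + 1)).length := by
          simp; omega
        have h2 : (Z.take (pvScanLen t Z + 1))[pvScanLen t Z]'h1 = Z[pvScanLen t Z]'hkl :=
          List.getElem_take
        rw [← h2]
        exact List.getElem_mem h1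
      have hg2 : PySem.List.pyGet? (Z[pvScanLen t Z]'hkl) 2
          = some ((Z[pvScanLen t Z]'hkl).getD 2 0) := by
        have := pvPyGetIdx (Z[pvScanLen t Z]'hkl) 2 (by omega)
        simpa using this
      have hstop : ¬ (Z[pvScanLen t Z]'hkl).getD 2 0 < t := by
        apply pvScanLen_stop t Z hkl
        rw [List.getD_eq_getElem _ _ hkl]
        exact hg2
      simp only [pvEcLoop, hg2]
      rw [if_neg hstop]
    · rw [if_neg hkl]
      have hdrop : Z.drop (pvScanLen t Z) = [] :=
        List.drop_eq_nil_of_le (by omega)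
      rw [hdrop]
      rfl
  | succ d IH =>
    intro i hi
    have hkle := pvScanLen_le t Z
    have hik : i < pvScanLen t Z := by omega
    have hiZ : i < Z.length := by omega
    rw [List.drop_eq_getElem_cons hiZ]
    obtain ⟨v, hv2, hvlt⟩ := pvScanLen_mem_lt t Z i hik
    rw [List.getD_eq_getElem _ _ hiZ] at hv2
    have h3 : 3 ≤ (Z[i]'hiZ).length := by
      apply hLen
      have h1 : i < (Z.take (pvScanLen t Z + 1)).length := by simp; omega
      have h2 : (Z.take (pvScanLen t Z + 1))[i]'h1 = Z[i]'hiZ := List.getElem_take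
      rw [← h2]
      exact List.getElem_mem h1
    have hg0 : PySem.List.pyGet? (Z[i]'hiZ) 0 = some ((Z[i]'hiZ).getD 0 0) := by
      have := pvPyGetIdx (Z[i]'hiZ) 0 (by omega); simpa using this
    have hg1 : PySem.List.pyGet? (Z[i]'hiZ) 1 = some ((Z[i]'hiZ).getD 1 0) := by
      have := pvPyGetIdx (Z[i]'hiZ) 1 (by omega); simpa using this
    set M := pvMergesOf Z (pvScanLen t Z) with hMdef
    have hML : M.length = pvScanLen t Z := by
      rw [hMdef]; simp [pvMergesOf]; omega
    have hiM : i < M.length := by omega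
    have hMi : M.getD i (0, 0) = ((Z[i]'hiZ).getD 0 0, (Z[i]'hiZ).getD 1 0) := by
      rw [hMdef, List.getD_eq_getElem _ _ (by rw [← hMdef]; exact hiM)]
      simp [pvMergesOf, List.getElem_take]
    set a := (Z[i]'hiZ).getD 0 0 with ha'
    set b := (Z[i]'hiZ).getD 1 0 with hb'
    have hnd' := hnd
    rw [kids_split hiM hMi] at hnd'
    obtain ⟨hnd12, -, -⟩ := List.nodup_append.mp hnd'
    obtain ⟨-, hndmid, hdisj⟩ := List.nodup_append.mp hnd12
    have hanotin : n ≤ a → a ∉ pvKids (M.take i) n := by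
      intro hna hmem
      exact hdisj a hmem a (by simp [List.mem_filter, hna]) rfl
    have hbnotin : n ≤ b → b ∉ pvKids (M.take i) n := by
      intro hnb hmem
      exact hdisj b hmem b (by simp [List.mem_filter, hnb]) rfl
    have habne : n ≤ b → b ≠ a := by
      intro hnb
      by_cases hna : n ≤ a
      · intro he
        have hfil : ([a, b].filter (fun c => n ≤ c)) = [a, b] := by simp [hna, hnb]
        rw [hfil] at hndmid
        simp at hndmid
        exact hndmid he.symm
      · intro he; exact hna (he ▸ hnb)
    have hbi := hb i hiM
    rw [hMi] at hbi
    have hstepa := pvStep_model (M := M) (n := n) (i := i) (ex := pvExK M n i) (c := a)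
      (by
        intro hna
        refine ⟨⟨(a - n).toNat, by omega, by have := hbi.1 hna; omega⟩, ?_⟩
        exact decide_eq_false (by simpa [pvExK] using hanotin hna))
    have hstepb := pvStep_model (M := M) (n := n) (i := i)
      (ex := fun x => pvExK M n i x || x == a) (c := b)
      (by
        intro hnb
        refine ⟨⟨(b - n).toNat, by omega, by have := hbi.2 hnb; omega⟩, ?_⟩
        rw [Bool.or_eq_false_iff]
        exact ⟨decide_eq_false (by simpa [pvExK] using hbnotin hnb),
          beq_eq_false_iff_ne.mpr (habne hnb)⟩)
    simp only [pvEcLoop, hv2, hvlt, if_true, hg0, hg1, hstepa, hstepb]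
    have hmerge : pvCanon M n a ++ pvCanon M n b = pvCanon M n (n + (i : Int)) :=
      (pvCanon_merge hb hiM hMi).symm
    rw [hmerge, pvGen_insert_fresh]
    have hkey_new : pvExK M n (i + 1) (n + (i : Int)) = false := by
      apply decide_eq_false
      intro hmem
      obtain ⟨j, hj, hlt⟩ := kids_lt hb (i + 1) (by omega) _ hmem
      omega
    have hpoint : ∀ j : Nat, j < i →
        ((pvExK M n i (n + (j : Int)) || ((n + (j : Int)) == a)) || ((n + (j : Int)) == b))
          = pvExK M n (i + 1) (n + (j : Int)) := by
      intro j _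
      have hm := mem_kids_iff (n := n) hiM hMi (n + (j : Int))
      have hcj : n ≤ n + (j : Int) := by omega
      rw [Bool.eq_iff_iff]
      simp only [pvExK, Bool.or_eq_true, decide_eq_true_eq, beq_iff_eq, hm]
      constructor
      · rintro ((hc | he) | he)
        · exact Or.inl hc
        · exact Or.inr (Or.inl ⟨by omega, he⟩)
        · exact Or.inr (Or.inr ⟨by omega, he⟩)
      · rintro (hc | ⟨hna, he⟩ | ⟨hnb, he⟩)
        · exact Or.inl (Or.inl hc)
        · exact Or.inl (Or.inr he)
        · exact Or.inr he
    have hgen : pvGen M n (i + 1) (pvExK M n (i + 1))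
        = pvGen M n i (fun x => (pvExK M n i x || x == a) || x == b)
          ++ [(n + (i : Int), pvCanon M n (n + (i : Int)))] := by
      rw [pvGen_succ, hkey_new]
      simp only [Bool.false_eq_true, if_false]
      congr 1
      exact (pvGen_congr hpoint).symm
    rw [← hgen]
    have hct : n + (i : Int) + 1 = n + (((i + 1 : Nat)) : Int) := by push_cast; ring
    rw [hct]
    exact IH (i + 1) (by omega)

lemma findStop_eq (t : Int) (Z : List (List Int))
    (hLen : ∀ r ∈ Z.take (pvScanLen t Z + 1), 3 ≤ r.length) :
    pvFindStop t Z
      = (if pvScanLen t Z < Z.length then some (some (pvScanLen t Z)) else some none) := by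
  induction Z with
  | nil => simp [pvFindStop, pvScanLen]
  | cons row rest IH =>
    have h3 : 3 ≤ row.length := by
      apply hLen row
      rw [List.take_succ_cons]
      exact List.mem_cons_self
    have hg2 : PySem.List.pyGet? row 2 = some (row.getD 2 0) := by
      have := pvPyGetIdx row 2 (by omega); simpa using this
    by_cases hv : row.getD 2 0 < t
    · have hsc : pvScanLen t (row :: rest) = pvScanLen t rest + 1 := by
        have hif : pvScanLen t (row :: rest)
            = if row.getD 2 0 < t then pvScanLen t rest + 1 else 0 := by rw [pvScanLen, hg2]
        rw [hif, if_pos hv]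
      have hLen' : ∀ r ∈ rest.take (pvScanLen t rest + 1), 3 ≤ r.length := by
        intro r hr
        apply hLen
        rw [hsc, List.take_succ_cons]
        exact List.mem_cons_of_mem _ hr
      rw [pvFindStop, hg2]
      simp only [if_pos hv]
      rw [IH hLen', hsc]
      by_cases hr : pvScanLen t rest < rest.length
      · rw [if_pos hr, if_pos (by simp; omega)]
        rfl
      · rw [if_neg hr, if_neg (by simp; omega)]
        rfl
    · have hsc : pvScanLen t (row :: rest) = 0 := by
        have hif : pvScanLen t (row :: rest)
            = if row.getD 2 0 < t then pvScanLen t rest + 1 else 0 := by rw [pvScanLen, hg2]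
        rw [hif, if_neg hv]
      rw [pvFindStop, hg2]
      simp only [if_neg hv]
      rw [hsc, if_pos (by simp)]

lemma pvFoldlAppendIf (cond : Nat → Bool) (g : Nat → Int × List Int) :
    ∀ (l : List Nat) (init : List (Int × List Int)),
      l.foldl (fun acc x => if cond x then acc else acc ++ [g x]) init
        = init ++ l.filterMap (fun x => if cond x then none else some (g x))
  | [], init => by simp
  | x :: l, init => by
    by_cases h : cond x <;>
      simp [h, pvFoldlAppendIf cond g l, List.append_assoc]

lemma alt_model (t n : Int) (Z : List (List Int))
    (hLen : ∀ r ∈ Z.take (pvScanLen t Z + 1), 3 ≤ r.length)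
    (hb : pvHB (pvMergesOf Z (pvScanLen t Z)) n) :
    extract_clusters_alt Z t n
      = (if pvScanLen t Z < Z.length
         then some (pvGen (pvMergesOf Z (pvScanLen t Z)) n (pvScanLen t Z)
           (pvExK (pvMergesOf Z (pvScanLen t Z)) n (pvScanLen t Z)))
         else none) := by
  have hkle := pvScanLen_le t Z
  have hML : (pvMergesOf Z (pvScanLen t Z)).length = pvScanLen t Z := by
    simp [pvMergesOf]; omega
  rw [extract_clusters_alt, findStop_eq t Z hLen]
  by_cases hkl : pvScanLen t Z < Z.length
  · rw [if_pos hkl, if_pos hkl]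
    simp only []
    congr 1
    have hmg : (Z.take (pvScanLen t Z)).map (fun r => (r.getD 0 0, r.getD 1 0))
        = pvMergesOf Z (pvScanLen t Z) := rfl
    rw [hmg]
    rw [pvFoldlAppendIf
      (fun x : Nat => (PySem.Set.ofList
        (((pvMergesOf Z (pvScanLen t Z)).flatMap (fun p => [p.1, p.2])).filter
          (fun c => n ≤ c))).contains (n + (x : Int)))
      (fun x : Nat => (n + (x : Int),
        pvLeaves (pvMergesOf Z (pvScanLen t Z)) n (pvScanLen t Z) (n + (x : Int))))]
    rw [List.nil_append]
    unfold pvGen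
    apply List.filterMap_congr
    intro j hjr
    have hj : j < pvScanLen t Z := List.mem_range.mp hjr
    have hcond : (PySem.Set.ofList
        (((pvMergesOf Z (pvScanLen t Z)).flatMap (fun p => [p.1, p.2])).filter
          (fun c => n ≤ c))).contains (n + (j : Int))
        = pvExK (pvMergesOf Z (pvScanLen t Z)) n (pvScanLen t Z) (n + (j : Int)) := by
      rw [pvExK, List.take_of_length_le (le_of_eq hML)]
      by_cases hmem : (n + (j : Int)) ∈ pvKids (pvMergesOf Z (pvScanLen t Z)) n <;>
        simp [PySem.Set.contains, PySem.Set.mem_ofList, pvKids, hmem] at *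
    rw [hcond]
    by_cases hex : pvExK (pvMergesOf Z (pvScanLen t Z)) n (pvScanLen t Z) (n + (j : Int))
    · rw [if_pos hex, if_pos hex]
    · rw [if_neg hex, if_neg hex]
      rw [pvLeaves_canon hb j (by omega) (pvScanLen t Z) (by omega)]
  · rw [if_neg hkl, if_neg hkl]

-- ===== VERDICT (by name: the statement is the Claim_ definition above) =====
theorem extract_clusters_spec : Claim_equal_extract_clusters := by
  intro Z t n _hDom hPre
  obtain ⟨hLen, hnd, hzip⟩ := hPre
  have hb : pvHB (pvMergesOf Z (pvScanLen t Z)) n := by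
    intro j hj
    have hl : j < ((pvMergesOf Z (pvScanLen t Z)).zipIdx).length := by simpa using hj
    have hz := List.getElem_zipIdx (h := hl)
    have hmem : ((pvMergesOf Z (pvScanLen t Z))[j]'hj, j)
        ∈ (pvMergesOf Z (pvScanLen t Z)).zipIdx := by
      rw [show ((pvMergesOf Z (pvScanLen t Z))[j]'hj, j)
          = ((pvMergesOf Z (pvScanLen t Z)).zipIdx)[j]'hl from by rw [hz]; simp]
      exact List.getElem_mem hl
    have hthis := hzip _ hmem
    rw [List.getD_eq_getElem _ _ hj]
    simpa using hthis
  show extract_clusters Z t n = extract_clusters_alt Z t n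
  rw [alt_model t n Z hLen hb]
  have hloop := loop_model t n Z hLen hnd hb (pvScanLen t Z) 0 (by omega)
  rw [extract_clusters]
  have h0 : (PySem.Dict.empty : PySem.Dict Int (List Int))
      = PySem.Dict.mk (pvGen (pvMergesOf Z (pvScanLen t Z)) n 0
        (pvExK (pvMergesOf Z (pvScanLen t Z)) n 0)) := rfl
  rw [h0]
  simpa using hloop
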